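-- pv_equiv track=rewrite | github.com/liupengsay/PyIsTheBestLang | src/dp/matrix_dp/problem.py | lc_1771
-- ===== SOURCE A (Python) =====
-- def lc_1771(word1: str, word2: str) -> int:
--     """
--     url: https://leetcode.cn/problems/maximize-palindrome-length-from-subsequences/
--     tag: longest_palindrome_subsequence|matrix_dp
--     """
--     # 最长回文子序列matrix_dp
--     m, n = len(word1), len(word2)
--     s = word1 + word2
--     ans = 0
--     dp = [[0] * (m + n) for _ in range(m + n)]
--     for i in range(m + n - 1, -1, -1):
--         dp[i][i] = 1
--         if i + 1 < m + n:
--             dp[i][i + 1] = 2 if s[i] == s[i + 1] else 1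
--         for j in range(i + 2, m + n):
--             a, b = dp[i + 1][j], dp[i][j - 1]
--             dp[i][j] = a if a > b else b
--             if s[i] == s[j]:
--                 a, b = dp[i][j], dp[i + 1][j - 1] + 2
--                 dp[i][j] = a if a > b else b
--     for i in range(m):
--         for j in range(m + n - 1, m - 1, -1):
--             if s[i] == s[j]:
--                 a, b = ans, dp[i + 1][j - 1] + 2
--                 ans = a if a > b else b
--                 break
--     return ans
-- ===== SOURCE B (Python) =====
-- def lc_1771(word1: str, word2: str) -> int:
--     # Anti-diagonal (interval-length-major) sweep with two rolling rows;
--     # spanning candidates are harvested on the diagonal where their inner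
--     # interval closes, using a last-occurrence map over the word2 region.
--     m, n = len(word1), len(word2)
--     N = m + n
--     s = word1 + word2
--     last = {}
--     for j in range(m, N):
--         last[s[j]] = j
--
--     def harvest(L, row, ans):
--         # the pair (i, last[s[i]]) closes at diagonal L when last[s[i]] == i + L + 2
--         for i in range(m):
--             if last.get(s[i], -1) == i + L + 2:
--                 v = row[i + 1] + 2
--                 if v > ans:
--                     ans = v
--         return ans
--
--     prev2 = [0] * (N + 1)            # diagonal L-2 (empty intervals)
--     ans = harvest(-1, prev2, 0)
--     prev1 = [1] * N + [0]            # diagonal L-1 (single characters)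
--     ans = harvest(0, prev1, ans)
--     for L in range(1, N):
--         cur = [0] * (N + 1)
--         for a in range(N - L):
--             b = prev1[a + 1] if prev1[a + 1] > prev1[a] else prev1[a]
--             if s[a] == s[a + L]:
--                 c = prev2[a + 1] + 2
--                 if c > b:
--                     b = c
--             cur[a] = b
--         ans = harvest(L, cur, ans)
--         prev2, prev1 = prev1, cur
--     return ans
-- ===== Notes on version B (the rewrite author's own statement) =====
-- stated objective: alternative
-- what changed: B sweeps the interval DP by anti-diagonals (increasing interval length) with two rolling rows instead of A's i-descending full (m+n)x(m+n) table, and folds the spanning answer into the sweep by harvesting each pair (i, last-occurrence of s[i] in word2) on the exact diagonal where its inner interval closes, replacing A's separate nested scan-with-break; memory drops from O(N^2) to O(N).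
import Mathlib
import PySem

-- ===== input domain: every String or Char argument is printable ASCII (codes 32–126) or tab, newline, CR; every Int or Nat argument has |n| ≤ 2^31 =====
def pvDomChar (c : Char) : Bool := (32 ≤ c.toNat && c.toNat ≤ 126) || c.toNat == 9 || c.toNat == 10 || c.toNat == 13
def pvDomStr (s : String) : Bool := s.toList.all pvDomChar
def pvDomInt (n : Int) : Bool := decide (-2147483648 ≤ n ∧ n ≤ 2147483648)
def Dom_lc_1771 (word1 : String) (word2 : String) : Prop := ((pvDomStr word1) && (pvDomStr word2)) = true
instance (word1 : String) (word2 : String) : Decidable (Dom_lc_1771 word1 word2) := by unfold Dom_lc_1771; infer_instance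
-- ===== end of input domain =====

-- B sweeps the interval DP by anti-diagonals (increasing interval length) with two rolling
-- rows and harvests each spanning candidate on the diagonal where its inner interval closes
-- (via a last-occurrence map), instead of A's i-descending full 2D table plus a separate
-- nested answer scan with break (objective: alternative, O(N) memory instead of O(N^2)).

-- ===== PORT A =====
-- s[i] (always called in range in both programs)
def pvGetC (s : List Char) (i : Int) : Char := PySem.List.pyGetD s i ' '
-- dp[i][j] read / write
def pvGet2 (dp : List (List Int)) (i j : Int) : Int :=
  PySem.List.pyGetD (PySem.List.pyGetD dp i []) j 0
def pvSet2 (dp : List (List Int)) (i j : Int) (v : Int) : List (List Int) :=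
  PySem.List.pySetD dp i (PySem.List.pySetD (PySem.List.pyGetD dp i []) j v)

-- the inner 'for j in range(i+2, m+n)' loop of A
def pvInnerA (s : List Char) (mn i : Int) (dp : List (List Int)) : List (List Int) :=
  (PySem.List.pyRange (i + 2) mn 1).foldl (fun dp j =>
    let a := pvGet2 dp (i + 1) j
    let b := pvGet2 dp i (j - 1)
    let dp := pvSet2 dp i j (if a > b then a else b)
    if pvGetC s i == pvGetC s j then
      let a := pvGet2 dp i j
      let b := pvGet2 dp (i + 1) (j - 1) + 2
      pvSet2 dp i j (if a > b then a else b)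
    else dp) dp

-- one iteration of A's outer 'for i in range(m+n-1, -1, -1)' loop
def pvRowA (s : List Char) (mn i : Int) (dp : List (List Int)) : List (List Int) :=
  let dp := pvSet2 dp i i 1
  let dp := if i + 1 < mn then
      pvSet2 dp i (i + 1) (if pvGetC s i == pvGetC s (i + 1) then 2 else 1)
    else dp
  pvInnerA s mn i dp

def pvFillA (s : List Char) (mn : Int) : List (List Int) :=
  (PySem.List.pyRange (mn - 1) (-1) (-1)).foldl (fun dp i => pvRowA s mn i dp)
    (List.replicate mn.toNat (List.replicate mn.toNat 0))

-- A's inner answer scan 'for j in range(m+n-1, m-1, -1): … break'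
def pvScanA (s : List Char) (dp : List (List Int)) (i ans : Int) : List Int → Int
  | [] => ans
  | j :: rest =>
    if pvGetC s i == pvGetC s j then
      let a := ans
      let b := pvGet2 dp (i + 1) (j - 1) + 2
      if a > b then a else b
    else pvScanA s dp i ans rest

def lc_1771 (word1 : String) (word2 : String) : Int :=
  let m : Int := word1.toList.length
  let n : Int := word2.toList.length
  let s : List Char := word1.toList ++ word2.toList
  let dp := pvFillA s (m + n)
  (PySem.List.pyRange 0 m 1).foldl
    (fun ans i => pvScanA s dp i ans (PySem.List.pyRange (m + n - 1) (m - 1) (-1))) 0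

-- ===== PORT B =====
-- last occurrence in the word2 region: 'for j in range(m, N): last[s[j]] = j'
def pvLastD (s : List Char) (m N : Int) : PySem.Dict Char Int :=
  (PySem.List.pyRange m N 1).foldl (fun d j => d.insert (pvGetC s j) j) PySem.Dict.empty

-- B's 'harvest(L, row, ans)': fold the candidates whose inner interval closes at diagonal L
def pvHarvestB (s : List Char) (m : Int) (last : PySem.Dict Char Int) (L : Int)
    (row : List Int) (ans : Int) : Int :=
  (PySem.List.pyRange 0 m 1).foldl (fun a i =>
    if last.getD (pvGetC s i) (-1) = i + L + 2 then
      let v := PySem.List.pyGetD row (i + 1) 0 + 2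
      if v > a then v else a
    else a) ans

-- B's inner 'for a in range(N - L)' loop building diagonal L from diagonals L-1, L-2
def pvCurB (s : List Char) (N L : Int) (prev1 prev2 : List Int) : List Int :=
  (PySem.List.pyRange 0 (N - L) 1).foldl (fun cur a =>
    let b := if PySem.List.pyGetD prev1 (a + 1) 0 > PySem.List.pyGetD prev1 a 0 then
        PySem.List.pyGetD prev1 (a + 1) 0 else PySem.List.pyGetD prev1 a 0
    let b := if pvGetC s a == pvGetC s (a + L) then
        (let c := PySem.List.pyGetD prev2 (a + 1) 0 + 2
         if c > b then c else b)
      else b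
    PySem.List.pySetD cur a b) (List.replicate (N + 1).toNat 0)

def lc_1771_alt (word1 : String) (word2 : String) : Int :=
  let m : Int := word1.toList.length
  let n : Int := word2.toList.length
  let N : Int := m + n
  let s : List Char := word1.toList ++ word2.toList
  let last := pvLastD s m N
  let prev2 : List Int := List.replicate (N + 1).toNat 0
  let ans : Int := pvHarvestB s m last (-1) prev2 0
  let prev1 : List Int := List.replicate N.toNat 1 ++ [0]
  let ans : Int := pvHarvestB s m last 0 prev1 ans
  ((PySem.List.pyRange 1 N 1).foldl (fun (st : Int × List Int × List Int) L =>
      let cur := pvCurB s N L st.2.1 st.2.2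
      (pvHarvestB s m last L cur st.1, cur, st.2.1)) (ans, prev1, prev2)).1

-- ===== PRECONDITION & SPEC =====
def Spec_lc_1771 (word1 : String) (word2 : String) (out : Int) : Prop := out = lc_1771_alt word1 word2
instance (word1 : String) (word2 : String) (out : Int) : Decidable (Spec_lc_1771 word1 word2 out) := by unfold Spec_lc_1771; infer_instance

-- ===== CLAIM (what is proved, stated in full; the proofs are below) =====
def Claim_equal_lc_1771 : Prop := ∀ (word1 : String) (word2 : String), Dom_lc_1771 word1 word2 → Spec_lc_1771 word1 word2 (lc_1771 word1 word2)

-- ===== LEMMAS AND PROOFS =====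

-- the common spec: longest palindromic subsequence of s[i..j]
def pvF (s : List Char) (i j : Nat) : Int :=
  if h : i < j then
    max (max (pvF s (i + 1) j) (pvF s i (j - 1)))
      (if s.getD i ' ' == s.getD j ' ' then pvF s (i + 1) (j - 1) + 2 else 0)
  else if i = j then 1 else 0
termination_by j - i
decreasing_by all_goals omega

lemma pvF_nonneg (s : List Char) (i j : Nat) : 0 ≤ pvF s i j := by
  fun_induction pvF s i j with
  | case1 i j h ih3 ih2 ih1 =>
    have := le_max_left (max (pvF s (i+1) j) (pvF s i (j-1)))
      (if (s.getD i ' ' == s.getD j ' ') = true then pvF s (i+1) (j-1) + 2 else 0)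
    have h2 := le_max_left (pvF s (i+1) j) (pvF s i (j-1))
    omega
  | case2 j h => norm_num
  | case3 i j h h2 => norm_num

-- `if a > b then a else b` is `max`
lemma pv_ifmax (a b : Int) : (if a > b then a else b) = max a b := by
  split <;> omega

lemma pv_ifmax' (a b : Int) : (if b > a then b else a) = max a b := by
  split <;> omega

-- one-step closed form of pvF on a proper interval
lemma pvF_closed (s : List Char) (i j : Nat) (h : i < j) :
    pvF s i j = if s.getD i ' ' == s.getD j ' ' then
        max (max (pvF s (i + 1) j) (pvF s i (j - 1))) (pvF s (i + 1) (j - 1) + 2)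
      else max (pvF s (i + 1) j) (pvF s i (j - 1)) := by
  rw [pvF, dif_pos h]
  cases hbe : (s.getD i ' ' == s.getD j ' ')
  · simp only [Bool.false_eq_true, if_false]
    exact max_eq_left (le_trans (pvF_nonneg s (i + 1) j) (le_max_left _ _))
  · simp

lemma pvF_diag (s : List Char) (i : Nat) : pvF s i i = 1 := by
  rw [pvF]; simp

lemma pvF_lower (s : List Char) (i j : Nat) (h : j < i) : pvF s i j = 0 := by
  rw [pvF]; simp [Nat.not_lt.mpr (le_of_lt h), Nat.ne_of_gt h]

lemma pvF_adj (s : List Char) (i : Nat) :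
    pvF s i (i + 1) = if s.getD i ' ' == s.getD (i + 1) ' ' then 2 else 1 := by
  rw [pvF_closed s i (i + 1) (by omega)]
  simp [pvF_diag, pvF_lower s (i + 1) i (by omega)]

-- generic countdown loop: foldl over range(k, -1, -1)
lemma pv_countdown {a : Type} (f : a → Int → a) (P : Int → a → Prop) (k0 : Int)
    (step : ∀ (k : Int) (x : a), 0 ≤ k → k ≤ k0 → P (k + 1) x → P k (f x k)) :
    ∀ (k : Int) (x : a), -1 ≤ k → k ≤ k0 → P (k + 1) x →
      P 0 ((PySem.List.pyRange k (-1) (-1)).foldl f x) := by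
  intro k x hk hk0 hP
  generalize ht : (k + 1).toNat = t
  induction t generalizing k x with
  | zero =>
    have hk1 : k = -1 := by omega
    subst hk1
    rw [PySem.List.pyRange_neg_one_eq_nil (by norm_num)]
    simpa using hP
  | succ t ih =>
    have h0 : (0 : Int) ≤ k := by omega
    rw [PySem.List.pyRange_neg_one_cons (by omega : (-1 : Int) < k)]
    simp only [List.foldl_cons]
    have hstep := step k x h0 hk0 hP
    have : k - 1 + 1 = k := by omega
    exact ih (k - 1) (f x k) (by omega) (by omega) (by rw [this]; exact hstep) (by omega)

-- generic countup loop: foldl over range(j, hi)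
lemma pv_countup {a : Type} (f : a → Int → a) (P : Int → a → Prop) (hi : Int)
    (step : ∀ (j : Int) (x : a), j < hi → P j x → P (j + 1) (f x j)) :
    ∀ (j : Int) (x : a), j ≤ hi → P j x → P hi ((PySem.List.pyRange j hi 1).foldl f x) := by
  intro j x hj hP
  generalize ht : (hi - j).toNat = t
  induction t generalizing j x with
  | zero =>
    have hje : j = hi := by omega
    subst hje
    rw [PySem.List.pyRange_one_eq_nil (le_refl _)]
    simpa using hP
  | succ t ih =>
    have hlt : j < hi := by omega
    rw [PySem.List.pyRange_one_cons hlt]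
    simp only [List.foldl_cons]
    exact ih (j + 1) (f x j) (by omega) (step j x hlt hP) (by omega)

-- Nat-level view of dp[i][j]
def pvG (dp : List (List Int)) (i j : Nat) : Int := (dp.getD i []).getD j 0

lemma pvGet2_natCast (dp : List (List Int)) (i j : Nat) :
    pvGet2 dp (i : Int) (j : Int) = pvG dp i j := by
  simp [pvGet2, pvG, PySem.List.pyGetD_natCast]

lemma pvGetC_natCast (s : List Char) (t : Nat) : pvGetC s (t : Int) = s.getD t ' ' := by
  simp [pvGetC]

def pvShape (dp : List (List Int)) (N : Nat) : Prop :=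
  dp.length = N ∧ ∀ r ∈ dp, r.length = N

lemma pv_getD_set {α : Type} (l : List α) (a b : Nat) (v d : α) :
    (l.set a v).getD b d = if a = b ∧ a < l.length then v else l.getD b d := by
  rw [List.getD_eq_getElem?_getD, List.getElem?_set, List.getD_eq_getElem?_getD]
  by_cases hab : a = b
  · subst hab
    by_cases hl : a < l.length
    · simp [hl]
    · simp [hl]
  · simp [hab]

lemma pvShape_row (dp : List (List Int)) (N : Nat) (h : pvShape dp N) (i : Nat) (hi : i < N) :
    (dp.getD i []).length = N := by
  obtain ⟨hlen, hrows⟩ := h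
  have hi' : i < dp.length := by omega
  rw [List.getD_eq_getElem?_getD, List.getElem?_eq_getElem hi']
  exact hrows _ (List.getElem_mem hi')

lemma pvShape_set2 (dp : List (List Int)) (N : Nat) (h : pvShape dp N) (i j : Nat) (hi : i < N)
    (v : Int) : pvShape (pvSet2 dp (i : Int) (j : Int) v) N := by
  obtain ⟨hlen, hrows⟩ := h
  have hrl := pvShape_row dp N ⟨hlen, hrows⟩ i hi
  unfold pvSet2
  rw [PySem.List.pyGetD_natCast, PySem.List.pySetD_natCast, PySem.List.pySetD_natCast]
  constructor
  · simp [hlen]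
  · intro r hr
    rcases List.mem_or_eq_of_mem_set hr with hmem | heq
    · exact hrows r hmem
    · subst heq; rw [List.length_set]; exact hrl

lemma pvG_set2 (dp : List (List Int)) (N : Nat) (h : pvShape dp N) (i j : Nat) (hi : i < N)
    (hj : j < N) (v : Int) (i' j' : Nat) :
    pvG (pvSet2 dp (i : Int) (j : Int) v) i' j' =
      if i' = i ∧ j' = j then v else pvG dp i' j' := by
  have hlen := h.1
  have hrl : (dp.getD i []).length = N := pvShape_row dp N h i hi
  unfold pvSet2 pvG
  rw [PySem.List.pyGetD_natCast, PySem.List.pySetD_natCast, PySem.List.pySetD_natCast]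
  rw [pv_getD_set]
  by_cases hii : i = i'
  · rw [if_pos ⟨hii, by omega⟩, pv_getD_set]
    by_cases hjj : j = j'
    · rw [if_pos ⟨hjj, by omega⟩, if_pos ⟨hii.symm, hjj.symm⟩]
    · rw [if_neg (by tauto), if_neg (by tauto), hii]
  · rw [if_neg (by tauto), if_neg (by tauto)]

-- ===== A's table realizes pvF =====

def pvOuterInv (s : List Char) (N : Nat) (k : Int) (dp : List (List Int)) : Prop :=
  pvShape dp N ∧ ∀ i j : Nat, i < N → j < N →
    pvG dp i j = if k ≤ (i : Int) then pvF s i j else 0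

lemma pvInnerA_done (s : List Char) (N : Nat) (i : Nat) (hi : i < N)
    (dp : List (List Int)) (hsh : pvShape dp N)
    (hrows : ∀ i' j' : Nat, i' < N → j' < N → i' ≠ i →
      pvG dp i' j' = if i < i' then pvF s i' j' else 0)
    (hrow : ∀ t : Nat, t < N → pvG dp i t = if (t : Int) < (i : Int) + 2 then pvF s i t else 0) :
    pvShape (pvInnerA s (N : Int) (i : Int) dp) N ∧
    (∀ i' j' : Nat, i' < N → j' < N → i' ≠ i →
      pvG (pvInnerA s (N : Int) (i : Int) dp) i' j' = if i < i' then pvF s i' j' else 0) ∧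
    (∀ t : Nat, t < N → pvG (pvInnerA s (N : Int) (i : Int) dp) i t = pvF s i t) := by
  by_cases hle : (i : Int) + 2 ≤ (N : Int)
  · have hmain : ((i : Int) + 2 ≤ (N : Int)) ∧ pvShape (pvInnerA s (N : Int) (i : Int) dp) N ∧
        (∀ i' j' : Nat, i' < N → j' < N → i' ≠ i →
          pvG (pvInnerA s (N : Int) (i : Int) dp) i' j' = if i < i' then pvF s i' j' else 0) ∧
        (∀ t : Nat, t < N → pvG (pvInnerA s (N : Int) (i : Int) dp) i t =
          if (t : Int) < (N : Int) then pvF s i t else 0) := by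
      unfold pvInnerA
      refine pv_countup _
        (fun jj dp' => ((i : Int) + 2 ≤ jj) ∧ pvShape dp' N ∧
          (∀ i' j' : Nat, i' < N → j' < N → i' ≠ i →
            pvG dp' i' j' = if i < i' then pvF s i' j' else 0) ∧
          (∀ t : Nat, t < N → pvG dp' i t = if (t : Int) < jj then pvF s i t else 0))
        (N : Int) ?_ ((i : Int) + 2) dp hle ⟨le_refl _, hsh, hrows, hrow⟩
      intro j dp' hjN hQ
      obtain ⟨hlo, hsh', hrows', hrow'⟩ := hQ
      dsimp only
      have hj0 : 0 ≤ j := by omega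
      have hjcast : ((j.toNat : Nat) : Int) = j := Int.toNat_of_nonneg hj0
      rw [← hjcast]
      set jN := j.toNat with hjdef
      have hjNlt : jN < N := by omega
      have hij : i + 2 ≤ jN := by omega
      have hi1 : i + 1 < N := by omega
      have hcast1 : ((i : Int) + 1) = ((i + 1 : Nat) : Int) := by push_cast; ring
      have hcast2 : ((jN : Int) - 1) = ((jN - 1 : Nat) : Int) := by omega
      have ha : pvGet2 dp' ((i : Int) + 1) (jN : Int) = pvF s (i + 1) jN := by
        rw [hcast1, pvGet2_natCast, hrows' (i + 1) jN hi1 hjNlt (by omega), if_pos (by omega)]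
      have hb : pvGet2 dp' (i : Int) ((jN : Int) - 1) = pvF s i (jN - 1) := by
        rw [hcast2, pvGet2_natCast, hrow' (jN - 1) (by omega), if_pos (by omega)]
      rw [ha, hb, pv_ifmax]
      set v1 := max (pvF s (i + 1) jN) (pvF s i (jN - 1)) with hv1
      have hsh1 : pvShape (pvSet2 dp' (i : Int) (jN : Int) v1) N :=
        pvShape_set2 dp' N hsh' i jN hi v1
      have hget1 := pvG_set2 dp' N hsh' i jN hi hjNlt v1
      have hchars : (pvGetC s (i : Int) == pvGetC s (jN : Int)) =
          (s.getD i ' ' == s.getD jN ' ') := by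
        rw [pvGetC_natCast, pvGetC_natCast]
      cases hbe : (s.getD i ' ' == s.getD jN ' ')
      · rw [hchars, hbe]
        simp only [Bool.false_eq_true, if_false]
        refine ⟨by omega, hsh1, ?_, ?_⟩
        · intro i' j' h1 h2 h3
          rw [hget1 i' j', if_neg (by tauto)]
          exact hrows' i' j' h1 h2 h3
        · intro t ht
          rw [hget1 i t]
          by_cases htj : t = jN
          · subst htj
            rw [if_pos ⟨rfl, rfl⟩, if_pos (by omega), pvF_closed s i jN (by omega), hbe]
            simpa using hv1
          · rw [if_neg (by tauto), hrow' t ht, ← hjcast]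
            by_cases hlt : (t : Int) < (jN : Int)
            · rw [if_pos hlt, if_pos (by omega)]
            · rw [if_neg hlt, if_neg (by omega)]
      · rw [hchars, hbe]
        simp only [if_true]
        have hg11 : pvGet2 (pvSet2 dp' (i : Int) (jN : Int) v1) (i : Int) (jN : Int) = v1 := by
          rw [pvGet2_natCast, hget1 i jN, if_pos ⟨rfl, rfl⟩]
        have hg12 : pvGet2 (pvSet2 dp' (i : Int) (jN : Int) v1) ((i : Int) + 1) ((jN : Int) - 1)
            = pvF s (i + 1) (jN - 1) := by
          rw [hcast1, hcast2, pvGet2_natCast, hget1 (i + 1) (jN - 1), if_neg (by omega),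
            hrows' (i + 1) (jN - 1) hi1 (by omega) (by omega), if_pos (by omega)]
        rw [hg11, hg12, pv_ifmax]
        set v2 := max v1 (pvF s (i + 1) (jN - 1) + 2) with hv2
        have hsh2 : pvShape (pvSet2 (pvSet2 dp' (i : Int) (jN : Int) v1) (i : Int) (jN : Int) v2) N :=
          pvShape_set2 _ N hsh1 i jN hi v2
        have hget2 := pvG_set2 (pvSet2 dp' (i : Int) (jN : Int) v1) N hsh1 i jN hi hjNlt v2
        refine ⟨by omega, hsh2, ?_, ?_⟩
        · intro i' j' h1 h2 h3
          rw [hget2 i' j', if_neg (by tauto), hget1 i' j', if_neg (by tauto)]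
          exact hrows' i' j' h1 h2 h3
        · intro t ht
          rw [hget2 i t]
          by_cases htj : t = jN
          · subst htj
            rw [if_pos ⟨rfl, rfl⟩, if_pos (by omega), pvF_closed s i jN (by omega), hbe]
            simp [hv2, hv1]
          · rw [if_neg (by tauto), hget1 i t, if_neg (by tauto), hrow' t ht, ← hjcast]
            by_cases hlt : (t : Int) < (jN : Int)
            · rw [if_pos hlt, if_pos (by omega)]
            · rw [if_neg hlt, if_neg (by omega)]
    obtain ⟨-, hsh', hrows', hrow'⟩ := hmain
    exact ⟨hsh', hrows', fun t ht => by rw [hrow' t ht, if_pos (by exact_mod_cast ht)]⟩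
  · unfold pvInnerA
    rw [PySem.List.pyRange_one_eq_nil (by omega)]
    simp only [List.foldl_nil]
    exact ⟨hsh, hrows, fun t ht => by rw [hrow t ht, if_pos (by omega)]⟩

lemma pvRowA_step (s : List Char) (N : Nat) (k : Int) (hk0 : 0 ≤ k) (hk : k ≤ (N : Int) - 1)
    (dp : List (List Int)) (h : pvOuterInv s N (k + 1) dp) :
    pvOuterInv s N k (pvRowA s (N : Int) k dp) := by
  obtain ⟨hsh, hcells⟩ := h
  have hkcast : ((k.toNat : Nat) : Int) = k := Int.toNat_of_nonneg hk0
  rw [← hkcast]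
  set kN := k.toNat with hkdef
  have hkN : kN < N := by omega
  unfold pvRowA
  dsimp only
  have hsh1 : pvShape (pvSet2 dp (kN : Int) (kN : Int) 1) N := pvShape_set2 dp N hsh kN kN hkN 1
  have hget1 := pvG_set2 dp N hsh kN kN hkN hkN 1
  have hc1 : ((kN : Int) + 1) = ((kN + 1 : Nat) : Int) := by push_cast; ring
  by_cases hadj : (kN : Int) + 1 < (N : Int)
  · rw [if_pos hadj, hc1]
    set w := if pvGetC s (kN : Int) == pvGetC s ((kN + 1 : Nat) : Int) then (2 : Int) else 1 with hwdef
    have hw : w = pvF s kN (kN + 1) := by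
      rw [hwdef, pvGetC_natCast, pvGetC_natCast, pvF_adj]
    have hsh2 : pvShape (pvSet2 (pvSet2 dp (kN : Int) (kN : Int) 1) (kN : Int) ((kN + 1 : Nat) : Int) w) N :=
      pvShape_set2 _ N hsh1 kN (kN + 1) hkN w
    have hget2 := pvG_set2 (pvSet2 dp (kN : Int) (kN : Int) 1) N hsh1 kN (kN + 1) hkN (by omega) w
    have hrows2 : ∀ i' j' : Nat, i' < N → j' < N → i' ≠ kN →
        pvG (pvSet2 (pvSet2 dp (kN : Int) (kN : Int) 1) (kN : Int) ((kN + 1 : Nat) : Int) w) i' j'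
          = if kN < i' then pvF s i' j' else 0 := by
      intro i' j' h1 h2 h3
      rw [hget2 i' j', if_neg (by tauto), hget1 i' j', if_neg (by tauto), hcells i' j' h1 h2]
      by_cases hgt : kN < i'
      · rw [if_pos (by omega), if_pos hgt]
      · rw [if_neg (by omega), if_neg hgt]
    have hrow2 : ∀ t : Nat, t < N →
        pvG (pvSet2 (pvSet2 dp (kN : Int) (kN : Int) 1) (kN : Int) ((kN + 1 : Nat) : Int) w) kN t
          = if (t : Int) < (kN : Int) + 2 then pvF s kN t else 0 := by
      intro t ht
      rw [hget2 kN t]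
      by_cases ht1 : t = kN + 1
      · subst ht1
        rw [if_pos ⟨rfl, rfl⟩, hw, if_pos (by omega)]
      · rw [if_neg (by tauto), hget1 kN t]
        by_cases ht0 : t = kN
        · subst ht0
          rw [if_pos ⟨rfl, rfl⟩, if_pos (by omega), pvF_diag]
        · rw [if_neg (by tauto), hcells kN t hkN ht, if_neg (by omega)]
          by_cases htl : t < kN
          · rw [if_pos (by omega), pvF_lower s kN t htl]
          · rw [if_neg (by omega)]
    obtain ⟨Ash, Arows, Arow⟩ := pvInnerA_done s N kN hkN _ hsh2 hrows2 hrow2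
    refine ⟨Ash, ?_⟩
    intro i j' h1 h2
    by_cases hik : i = kN
    · subst hik
      rw [Arow j' h2, if_pos (le_refl _)]
    · rw [Arows i j' h1 h2 hik]
      by_cases hgt : kN < i
      · rw [if_pos hgt, if_pos (by omega)]
      · rw [if_neg hgt, if_neg (by omega)]
  · rw [if_neg hadj]
    have hrows2 : ∀ i' j' : Nat, i' < N → j' < N → i' ≠ kN →
        pvG (pvSet2 dp (kN : Int) (kN : Int) 1) i' j' = if kN < i' then pvF s i' j' else 0 := by
      intro i' j' h1 h2 h3
      rw [hget1 i' j', if_neg (by tauto), hcells i' j' h1 h2]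
      by_cases hgt : kN < i'
      · rw [if_pos (by omega), if_pos hgt]
      · rw [if_neg (by omega), if_neg hgt]
    have hrow2 : ∀ t : Nat, t < N →
        pvG (pvSet2 dp (kN : Int) (kN : Int) 1) kN t
          = if (t : Int) < (kN : Int) + 2 then pvF s kN t else 0 := by
      intro t ht
      rw [hget1 kN t]
      by_cases ht0 : t = kN
      · subst ht0
        rw [if_pos ⟨rfl, rfl⟩, if_pos (by omega), pvF_diag]
      · rw [if_neg (by tauto), hcells kN t hkN ht, if_neg (by omega), if_pos (by omega),
          pvF_lower s kN t (by omega)]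
    obtain ⟨Ash, Arows, Arow⟩ := pvInnerA_done s N kN hkN _ hsh1 hrows2 hrow2
    refine ⟨Ash, ?_⟩
    intro i j' h1 h2
    by_cases hik : i = kN
    · subst hik
      rw [Arow j' h2, if_pos (le_refl _)]
    · rw [Arows i j' h1 h2 hik]
      by_cases hgt : kN < i
      · rw [if_pos hgt, if_pos (by omega)]
      · rw [if_neg hgt, if_neg (by omega)]

lemma pvFillA_done (s : List Char) (i j : Nat) (hi : i < s.length) (hj : j < s.length) :
    pvG (pvFillA s (s.length : Int)) i j = pvF s i j := by
  set N := s.length with hN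
  have hmain : pvOuterInv s N 0 (pvFillA s (N : Int)) := by
    unfold pvFillA
    refine pv_countdown _ (fun k dp => pvOuterInv s N k dp) ((N : Int) - 1)
      (fun k dp hk0 hk hP => pvRowA_step s N k hk0 hk dp hP) ((N : Int) - 1)
      _ (by omega) (le_refl _) ?_
    constructor
    · refine ⟨by simp [Int.toNat_natCast], ?_⟩
      intro r hr
      rw [List.eq_of_mem_replicate hr]
      simp [Int.toNat_natCast]
    · intro i' j' h1 h2
      rw [if_neg (by omega)]
      unfold pvG
      simp [List.getD_eq_getElem?_getD, Int.toNat_natCast, h1, h2]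
  rw [hmain.2 i j hi hj, if_pos (by omega)]

-- ===== the answer-candidate spec shared by both sides =====

def pvMerge (a : Int) (o : Option Int) : Int := o.elim a (max a)

def pvLastSpec (s : List Char) (m : Int) (c : Char) : Option Int :=
  (PySem.List.pyRange ((s.length : Int) - 1) (m - 1) (-1)).find? (fun j => pvGetC s j == c)

def pvCand (s : List Char) (m i : Int) : Option Int :=
  (pvLastSpec s m (pvGetC s i)).map (fun j => pvF s (i + 1).toNat (j - 1).toNat + 2)

lemma pvLastSpec_mem (s : List Char) (m : Int) (c : Char) (j : Int)
    (h : pvLastSpec s m c = some j) :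
    m - 1 < j ∧ j ≤ (s.length : Int) - 1 ∧ (pvGetC s j == c) = true := by
  unfold pvLastSpec at h
  have hmem := List.mem_of_find?_eq_some h
  have hpred := List.find?_some h
  rw [PySem.List.mem_pyRange_neg_one] at hmem
  exact ⟨hmem.1, hmem.2, hpred⟩

-- A's scan-with-break computes the merge of the first (= largest-j) match
lemma pvScanA_eq (s : List Char) (dp : List (List Int)) (i ans : Int) (js : List Int) :
    pvScanA s dp i ans js =
      match js.find? (fun j => pvGetC s j == pvGetC s i) with
      | none => ans
      | some j => max ans (pvGet2 dp (i + 1) (j - 1) + 2) := by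
  induction js with
  | nil => rfl
  | cons j rest ih =>
    have hsym : (pvGetC s j == pvGetC s i) = (pvGetC s i == pvGetC s j) := by
      simp [eq_comm]
    rw [pvScanA]
    cases hbe : (pvGetC s i == pvGetC s j)
    · rw [List.find?_cons_of_neg (by simp [hsym, hbe])]
      rw [if_neg (by simp)]
      exact ih
    · rw [List.find?_cons_of_pos (by simp [hsym, hbe])]
      simpa using pv_ifmax ans (pvGet2 dp (i + 1) (j - 1) + 2)

-- B's dict of last occurrences agrees with the descending-scan spec
lemma pvLastD_get? (s : List Char) (m : Int) (_hm0 : 0 ≤ m) (hm : m ≤ (s.length : Int)) (c : Char) :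
    (pvLastD s m (s.length : Int)).get? c = pvLastSpec s m c := by
  unfold pvLastD pvLastSpec
  refine (pv_countup _
    (fun jj d => m ≤ jj ∧ ∀ c', PySem.Dict.get? d c' =
      (PySem.List.pyRange (jj - 1) (m - 1) (-1)).find? (fun t => pvGetC s t == c'))
    ((s.length : Int)) ?_ m PySem.Dict.empty hm ⟨le_refl _, ?_⟩).2 c
  · intro j d hj hP
    obtain ⟨hmj, hinv⟩ := hP
    refine ⟨by omega, ?_⟩
    intro c'
    have he : j + 1 - 1 = j := by ring
    rw [he, PySem.Dict.get?_insert, PySem.List.pyRange_neg_one_cons (by omega : m - 1 < j)]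
    by_cases hc : c' = pvGetC s j
    · rw [if_pos hc, List.find?_cons_of_pos (by simp [hc])]
    · rw [if_neg hc, List.find?_cons_of_neg (by simpa using fun h => hc h.symm), hinv c']
  · intro c'
    rw [PySem.Dict.get?_empty, PySem.List.pyRange_neg_one_eq_nil (le_refl _), List.find?_nil]

-- A's answer loop as a merge-fold of candidates
lemma pv_ansA (word1 word2 : String) :
    lc_1771 word1 word2 =
      (PySem.List.pyRange 0 (word1.toList.length : Int) 1).foldl
        (fun a i => pvMerge a (pvCand (word1.toList ++ word2.toList) (word1.toList.length : Int) i)) 0 := by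
  unfold lc_1771
  dsimp only
  set s : List Char := word1.toList ++ word2.toList with hs
  set m : Int := (word1.toList.length : Int) with hmdef
  have hmn : m + (word2.toList.length : Int) = (s.length : Int) := by
    simp [hs, hmdef]
  rw [hmn]
  refine PySem.List.foldl_congr_mem _ _ _ _ ?_
  intro acc i hi
  obtain ⟨hi0, him⟩ := PySem.List.mem_pyRange_one.mp hi
  rw [pvScanA_eq]
  have hmN : m ≤ (s.length : Int) := by
    have h2 : (0 : Int) ≤ (word2.toList.length : Int) := Int.natCast_nonneg _
    omega
  cases hfind : (PySem.List.pyRange ((s.length : Int) - 1) (m - 1) (-1)).find?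
      (fun j => pvGetC s j == pvGetC s i) with
  | none =>
    show acc = pvMerge acc (pvCand s m i)
    unfold pvCand pvLastSpec
    rw [hfind]
    rfl
  | some jv =>
    show max acc (pvGet2 (pvFillA s (s.length : Int)) (i + 1) (jv - 1) + 2)
      = pvMerge acc (pvCand s m i)
    obtain ⟨hj1, hj2, -⟩ := pvLastSpec_mem s m (pvGetC s i) jv (by unfold pvLastSpec; exact hfind)
    have hc1 : (i + 1 : Int) = (((i + 1).toNat : Nat) : Int) := by omega
    have hc2 : (jv - 1 : Int) = (((jv - 1).toNat : Nat) : Int) := by omega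
    rw [hc1, hc2, pvGet2_natCast,
      pvFillA_done s (i + 1).toNat (jv - 1).toNat (by omega) (by omega)]
    unfold pvCand pvLastSpec
    rw [hfind]
    rfl

-- ===== B side: option-max algebra =====

def pvOMax : Option Int → Option Int → Option Int
  | none, o => o
  | some a, none => some a
  | some a, some b => some (max a b)

lemma pvMerge_assoc (z : Int) (o1 o2 : Option Int) :
    pvMerge (pvMerge z o1) o2 = pvMerge z (pvOMax o1 o2) := by
  cases o1 <;> cases o2 <;> simp [pvMerge, pvOMax, max_assoc]

lemma pvMerge_comm (z : Int) (x y : Option Int) :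
    pvMerge (pvMerge z x) y = pvMerge (pvMerge z y) x := by
  cases x <;> cases y <;> simp [pvMerge, max_comm, max_left_comm]

lemma pv_merge_out (f : Int → Option Int) (l : List Int) (z : Int) (o : Option Int) :
    pvMerge (l.foldl (fun z i => pvMerge z (f i)) z) o
      = l.foldl (fun z i => pvMerge z (f i)) (pvMerge z o) := by
  induction l generalizing z with
  | nil => rfl
  | cons i t ih =>
    simp only [List.foldl_cons]
    rw [ih (pvMerge z (f i)), pvMerge_comm]

lemma pv_fold_split (f g : Int → Option Int) (l : List Int) (z : Int) :
    l.foldl (fun z i => pvMerge z (g i)) (l.foldl (fun z i => pvMerge z (f i)) z)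
      = l.foldl (fun z i => pvMerge z (pvOMax (f i) (g i))) z := by
  induction l generalizing z with
  | nil => rfl
  | cons i t ih =>
    simp only [List.foldl_cons]
    rw [pv_merge_out f t (pvMerge z (f i)) (g i), pvMerge_comm, ← pvMerge_assoc, pvMerge_comm,
      pvMerge_assoc]
    exact ih (pvMerge z (pvOMax (f i) (g i)))

-- ===== B side: diagonal rows and harvesting =====

-- the contents of the rolling row for diagonal L
def pvRowSpec (s : List Char) (L : Int) (a : Nat) : Int :=
  if 0 ≤ (a : Int) + L ∧ (a : Int) + L ≤ (s.length : Int) - 1 then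
    pvF s a ((a : Int) + L).toNat else 0

-- the candidate harvested for i exactly at diagonal L
def pvC (s : List Char) (m i L : Int) : Option Int :=
  if pvLastSpec s m (pvGetC s i) = some (i + L + 2) then pvCand s m i else none

-- the candidates for i already harvested strictly before diagonal K-1 closes, i.e. j < i+K+2
def pvCP (s : List Char) (m i K : Int) : Option Int :=
  match pvLastSpec s m (pvGetC s i) with
  | none => none
  | some j => if j < i + K + 2 then pvCand s m i else none

lemma pvRowSpec_neg1 (s : List Char) (a : Nat) : pvRowSpec s (-1) a = 0 := by
  unfold pvRowSpec
  split
  · rename_i h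
    have ha1 : 1 ≤ a := by omega
    have : ((a : Int) + -1).toNat = a - 1 := by omega
    rw [this, pvF_lower s a (a - 1) (by omega)]
  · rfl

lemma pvHarvestB_eq (s : List Char) (m : Int) (hm0 : 0 ≤ m) (hmN : m ≤ (s.length : Int))
    (L : Int) (hL : -1 ≤ L) (row : List Int)
    (hrow : ∀ a : Nat, row.getD a 0 = pvRowSpec s L a) (ans : Int) :
    pvHarvestB s m (pvLastD s m (s.length : Int)) L row ans
      = (PySem.List.pyRange 0 m 1).foldl (fun z i => pvMerge z (pvC s m i L)) ans := by
  unfold pvHarvestB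
  refine PySem.List.foldl_congr_mem _ _ _ _ ?_
  intro z i hi
  obtain ⟨hi0, him⟩ := PySem.List.mem_pyRange_one.mp hi
  dsimp only
  rw [PySem.Dict.getD_eq_get?_getD, pvLastD_get? s m hm0 hmN]
  cases hfind : pvLastSpec s m (pvGetC s i) with
  | none =>
    rw [Option.getD_none, if_neg (by omega)]
    simp [pvC, hfind, pvMerge]
  | some j =>
    rw [Option.getD_some]
    obtain ⟨hj1, hj2, -⟩ := pvLastSpec_mem s m (pvGetC s i) j hfind
    by_cases hj : j = i + L + 2
    · rw [if_pos hj]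
      have hc1 : (i + 1 : Int) = (((i + 1).toNat : Nat) : Int) := by omega
      have hidx : (((i + 1).toNat : Nat) : Int) + L = j - 1 := by omega
      have hspec : pvRowSpec s L ((i + 1).toNat) = pvF s (i + 1).toNat (j - 1).toNat := by
        unfold pvRowSpec
        rw [hidx, if_pos (by constructor <;> omega)]
      have hc : pvC s m i L = some (pvF s (i + 1).toNat (j - 1).toNat + 2) := by
        unfold pvC pvCand
        rw [if_pos (by rw [hfind, hj]), hfind, Option.map_some]
      rw [hc1, PySem.List.pyGetD_natCast, hrow, hspec, hc, pv_ifmax']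
      simp [pvMerge]
    · rw [if_neg hj]
      have : pvC s m i L = none := by
        unfold pvC
        rw [if_neg (by rw [hfind]; intro h; exact hj (Option.some.inj h))]
      rw [this]
      rfl

lemma pv_getD_replicate0 (K : Nat) (a : Nat) : (List.replicate K (0 : Int)).getD a 0 = 0 := by
  rw [List.getD_eq_getElem?_getD, List.getElem?_replicate]
  split <;> rfl

lemma pvBase1 (s : List Char) (a : Nat) :
    ((List.replicate s.length (1 : Int)) ++ [0]).getD a 0 = pvRowSpec s 0 a := by
  unfold pvRowSpec
  by_cases h : a < s.length
  · rw [List.getD_eq_getElem?_getD, List.getElem?_append_left (by simpa using h)]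
    rw [List.getElem?_replicate, if_pos h]
    rw [if_pos (by constructor <;> omega)]
    have : ((a : Int) + 0).toNat = a := by omega
    rw [this, pvF_diag]
    rfl
  · rw [if_neg (by omega), List.getD_eq_getElem?_getD]
    by_cases h2 : a = s.length
    · subst h2
      rw [List.getElem?_append_right (by simp)]
      simp
    · rw [List.getElem?_eq_none (by simp; omega)]
      rfl

lemma pvCurB_correct (s : List Char) (L : Int) (hL1 : 1 ≤ L) (hL2 : L ≤ (s.length : Int) - 1)
    (prev1 prev2 : List Int)
    (h1 : ∀ a : Nat, prev1.getD a 0 = pvRowSpec s (L - 1) a)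
    (h2 : ∀ a : Nat, prev2.getD a 0 = pvRowSpec s (L - 2) a) :
    ∀ a : Nat, (pvCurB s (s.length : Int) L prev1 prev2).getD a 0 = pvRowSpec s L a := by
  set N := s.length with hN
  have hmain : 0 ≤ (N : Int) - L ∧ (∀ t : Nat, (pvCurB s (N : Int) L prev1 prev2).getD t 0 =
      if (t : Int) < (N : Int) - L then pvRowSpec s L t else 0) ∧
      (pvCurB s (N : Int) L prev1 prev2).length = ((N : Int) + 1).toNat := by
    unfold pvCurB
    have := pv_countup (fun cur a =>
        let b := if PySem.List.pyGetD prev1 (a + 1) 0 > PySem.List.pyGetD prev1 a 0 then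
            PySem.List.pyGetD prev1 (a + 1) 0 else PySem.List.pyGetD prev1 a 0
        let b := if pvGetC s a == pvGetC s (a + L) then
            (let c := PySem.List.pyGetD prev2 (a + 1) 0 + 2
             if c > b then c else b)
          else b
        PySem.List.pySetD cur a b)
      (fun aa cur => 0 ≤ aa ∧
        (∀ t : Nat, cur.getD t 0 = if (t : Int) < aa then pvRowSpec s L t else 0) ∧
        cur.length = ((N : Int) + 1).toNat)
      ((N : Int) - L) ?_ 0 (List.replicate ((N : Int) + 1).toNat 0) (by omega) ⟨le_refl _, ?_, ?_⟩
    · exact this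
    · intro a cur ha hP
      obtain ⟨ha0, hcells, hlen⟩ := hP
      dsimp only
      refine ⟨by omega, ?_⟩
      · have hacast : ((a.toNat : Nat) : Int) = a := Int.toNat_of_nonneg ha0
        rw [← hacast]
        set aN := a.toNat with haN
        have haN1 : (aN : Int) < (N : Int) - L := by omega
        set LN := L.toNat with hLN
        have hLcast : ((LN : Nat) : Int) = L := Int.toNat_of_nonneg (by omega)
        set jN := aN + LN with hjN
        have hjNN : jN < N := by omega
        have hv1 : PySem.List.pyGetD prev1 ((aN : Int) + 1) 0 = pvF s (aN + 1) jN := by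
          have hc : ((aN : Int) + 1) = ((aN + 1 : Nat) : Int) := by push_cast; ring
          rw [hc, PySem.List.pyGetD_natCast, h1]
          unfold pvRowSpec
          rw [if_pos (by constructor <;> omega)]
          congr 1
          omega
        have hv2 : PySem.List.pyGetD prev1 (aN : Int) 0 = pvF s aN (jN - 1) := by
          rw [PySem.List.pyGetD_natCast, h1]
          unfold pvRowSpec
          rw [if_pos (by constructor <;> omega)]
          congr 1
          omega
        have hv3 : PySem.List.pyGetD prev2 ((aN : Int) + 1) 0 = pvF s (aN + 1) (jN - 1) := by
          have hc : ((aN : Int) + 1) = ((aN + 1 : Nat) : Int) := by push_cast; ring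
          rw [hc, PySem.List.pyGetD_natCast, h2]
          unfold pvRowSpec
          rw [if_pos (by constructor <;> omega)]
          congr 1
          omega
        have hcj : ((aN : Int) + L) = ((jN : Nat) : Int) := by omega
        have hchars : (pvGetC s (aN : Int) == pvGetC s ((aN : Int) + L)) =
            (s.getD aN ' ' == s.getD jN ' ') := by
          rw [hcj, pvGetC_natCast, pvGetC_natCast]
        have hval : (if pvGetC s (aN : Int) == pvGetC s ((aN : Int) + L) then
            (if pvF s (aN + 1) (jN - 1) + 2 >
                (if pvF s (aN + 1) jN > pvF s aN (jN - 1) then pvF s (aN + 1) jN else pvF s aN (jN - 1)) then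
              pvF s (aN + 1) (jN - 1) + 2
            else (if pvF s (aN + 1) jN > pvF s aN (jN - 1) then pvF s (aN + 1) jN else pvF s aN (jN - 1)))
            else (if pvF s (aN + 1) jN > pvF s aN (jN - 1) then pvF s (aN + 1) jN else pvF s aN (jN - 1)))
            = pvF s aN jN := by
          rw [pv_ifmax (pvF s (aN + 1) jN) (pvF s aN (jN - 1))]
          rw [pv_ifmax' (max (pvF s (aN + 1) jN) (pvF s aN (jN - 1))) (pvF s (aN + 1) (jN - 1) + 2)]
          rw [hchars, pvF_closed s aN jN (by omega)]
        rw [hv1, hv2, hv3, hval, PySem.List.pySetD_natCast]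
        refine ⟨?_, by rw [List.length_set]; exact hlen⟩
        intro t
        rw [pv_getD_set]
        by_cases hta : aN = t
        · subst hta
          rw [if_pos ⟨rfl, by omega⟩, if_pos (by omega)]
          unfold pvRowSpec
          rw [if_pos (by constructor <;> omega)]
          congr 1
          omega
        · rw [if_neg (by tauto), hcells t, hacast]
          by_cases hlt : (t : Int) < a
          · rw [if_pos hlt, if_pos (by omega)]
          · rw [if_neg hlt, if_neg (by omega)]
    · intro t
      rw [pv_getD_replicate0, if_neg (by omega)]
    · simp
  intro a
  rw [hmain.2.1 a]
  by_cases h : (a : Int) < (N : Int) - L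
  · rw [if_pos h]
  · rw [if_neg h]
    unfold pvRowSpec
    rw [if_neg (by omega)]

-- merging the freshly closed diagonal into the already-harvested prefix
lemma pvOMax_step (s : List Char) (m i L : Int) :
    pvOMax (pvCP s m i L) (pvC s m i L) = pvCP s m i (L + 1) := by
  unfold pvCP pvC
  cases hfind : pvLastSpec s m (pvGetC s i) with
  | none => rfl
  | some j =>
    dsimp only
    have hcand : ∃ v, pvCand s m i = some v := by
      unfold pvCand
      rw [hfind]
      exact ⟨_, rfl⟩
    obtain ⟨v, hv⟩ := hcand
    by_cases h1 : j < i + L + 2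
    · rw [if_pos h1, if_neg (by intro h; injection h with h; omega), if_pos (by omega), hv]
      rfl
    · by_cases h2 : j = i + L + 2
      · rw [if_neg (by omega), if_pos (by rw [h2]), if_pos (by omega), hv]
        rfl
      · rw [if_neg (by omega), if_neg (by intro h; injection h with h; omega), if_neg (by omega)]
        rfl

-- the two base harvests (L = -1 and L = 0) give the prefix for K = 1
lemma pvOMax_base (s : List Char) (m i : Int) (him : i < m) :
    pvOMax (pvC s m i (-1)) (pvC s m i 0) = pvCP s m i 1 := by
  unfold pvCP pvC
  cases hfind : pvLastSpec s m (pvGetC s i) with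
  | none => rfl
  | some j =>
    dsimp only
    obtain ⟨hj1, hj2, -⟩ := pvLastSpec_mem s m (pvGetC s i) j hfind
    have hjlo : i + 1 ≤ j := by omega
    have hcand : ∃ v, pvCand s m i = some v := by
      unfold pvCand
      rw [hfind]
      exact ⟨_, rfl⟩
    obtain ⟨v, hv⟩ := hcand
    by_cases h1 : j = i + 1
    · rw [if_pos (by rw [h1]; congr 1; omega), if_neg (by intro h; injection h with h; omega),
        if_pos (by omega), hv]
      rfl
    · by_cases h2 : j = i + 2
      · rw [if_neg (by intro h; injection h with h; omega), if_pos (by rw [h2]; congr 1; omega),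
        if_pos (by omega), hv]
        rfl
      · rw [if_neg (by intro h; injection h with h; omega),
          if_neg (by intro h; injection h with h; omega), if_neg (by omega)]
        rfl

-- B's whole computation as a merge-fold of candidates
lemma pv_ansB (word1 word2 : String) :
    lc_1771_alt word1 word2 =
      (PySem.List.pyRange 0 (word1.toList.length : Int) 1).foldl
        (fun a i => pvMerge a (pvCand (word1.toList ++ word2.toList) (word1.toList.length : Int) i)) 0 := by
  unfold lc_1771_alt
  dsimp only
  set s : List Char := word1.toList ++ word2.toList with hs
  set m : Int := (word1.toList.length : Int) with hmdef
  have hmn : m + (word2.toList.length : Int) = (s.length : Int) := by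
    simp [hs, hmdef]
  rw [hmn]
  have hm0 : 0 ≤ m := Int.natCast_nonneg _
  have hmN : m ≤ (s.length : Int) := by
    have h2 : (0 : Int) ≤ (word2.toList.length : Int) := Int.natCast_nonneg _
    omega
  have hNtoNat : ((s.length : Int)).toNat = s.length := Int.toNat_natCast _
  -- base rows
  have hrow2 : ∀ a : Nat, (List.replicate ((s.length : Int) + 1).toNat (0 : Int)).getD a 0
      = pvRowSpec s (-1) a := by
    intro a
    rw [pv_getD_replicate0, pvRowSpec_neg1]
  have hrow1 : ∀ a : Nat, (List.replicate ((s.length : Int)).toNat (1 : Int) ++ [0]).getD a 0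
      = pvRowSpec s 0 a := by
    intro a
    rw [hNtoNat]
    exact pvBase1 s a
  -- the two base harvests
  rw [pvHarvestB_eq s m hm0 hmN (-1) (by norm_num) _ hrow2 0]
  rw [pvHarvestB_eq s m hm0 hmN 0 (by norm_num) _ hrow1 _]
  rw [pv_fold_split]
  have hbase : (PySem.List.pyRange 0 m 1).foldl
      (fun z i => pvMerge z (pvOMax (pvC s m i (-1)) (pvC s m i 0))) 0
      = (PySem.List.pyRange 0 m 1).foldl (fun z i => pvMerge z (pvCP s m i 1)) 0 := by
    refine PySem.List.foldl_congr_mem _ _ _ _ ?_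
    intro z i hi
    obtain ⟨hi0, him⟩ := PySem.List.mem_pyRange_one.mp hi
    rw [pvOMax_base s m i him]
  rw [hbase]
  -- the main diagonal loop
  by_cases hN1 : 1 ≤ (s.length : Int)
  · have hmain := pv_countup
      (fun (st : Int × List Int × List Int) L =>
        let cur := pvCurB s (s.length : Int) L st.2.1 st.2.2
        (pvHarvestB s m (pvLastD s m (s.length : Int)) L cur st.1, cur, st.2.1))
      (fun K st => 1 ≤ K ∧
        (∀ a : Nat, st.2.1.getD a 0 = pvRowSpec s (K - 1) a) ∧
        (∀ a : Nat, st.2.2.getD a 0 = pvRowSpec s (K - 2) a) ∧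
        st.1 = (PySem.List.pyRange 0 m 1).foldl (fun z i => pvMerge z (pvCP s m i K)) 0)
      ((s.length : Int)) ?_ 1
      ((PySem.List.pyRange 0 m 1).foldl (fun z i => pvMerge z (pvCP s m i 1)) 0,
        List.replicate ((s.length : Int)).toNat 1 ++ [0],
        List.replicate ((s.length : Int) + 1).toNat 0)
      hN1 ⟨le_refl _, ?_, ?_, rfl⟩
    · obtain ⟨-, -, -, hfin⟩ := hmain
      rw [hfin]
      refine PySem.List.foldl_congr_mem _ _ _ _ ?_
      intro z i hi
      obtain ⟨hi0, him⟩ := PySem.List.mem_pyRange_one.mp hi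
      unfold pvCP
      cases hfind : pvLastSpec s m (pvGetC s i) with
      | none =>
        unfold pvCand
        rw [hfind]
        rfl
      | some j =>
        dsimp only
        obtain ⟨hj1, hj2, -⟩ := pvLastSpec_mem s m (pvGetC s i) j hfind
        rw [if_pos (by omega)]
    · intro L st hL hP
      obtain ⟨hL1, hp1, hp2, hans⟩ := hP
      dsimp only
      have hcur := pvCurB_correct s L hL1 (by omega) st.2.1 st.2.2
        (by intro a; rw [hp1 a]) (by intro a; rw [hp2 a])
      refine ⟨by omega, ?_, ?_, ?_⟩
      · intro a
        have : L + 1 - 1 = L := by ring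
        rw [this]
        exact hcur a
      · intro a
        have : L + 1 - 2 = L - 1 := by ring
        rw [this]
        exact hp1 a
      · rw [pvHarvestB_eq s m hm0 hmN L (by omega) _ hcur st.1, hans, pv_fold_split]
        refine PySem.List.foldl_congr_mem _ _ _ _ ?_
        intro z i hi
        rw [pvOMax_step s m i L]
    · intro a
      have : (1 : Int) - 1 = 0 := by norm_num
      rw [this]
      exact hrow1 a
    · intro a
      have : (1 : Int) - 2 = -1 := by norm_num
      rw [this]
      exact hrow2 a
  · -- N = 0: both the loop range and the answer range are empty
    have hm00 : m = 0 := by omega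
    have hnil : PySem.List.pyRange (1 : Int) ((s.length : Int)) 1 = ([] : List Int) :=
      PySem.List.pyRange_one_eq_nil (by omega)
    have hnil2 : PySem.List.pyRange (0 : Int) (0 : Int) 1 = ([] : List Int) :=
      PySem.List.pyRange_one_eq_nil (le_refl _)
    rw [hnil, hm00, hnil2]
    simp only [List.foldl_nil]

theorem lc_1771_spec : Claim_equal_lc_1771 := by
  intro word1 word2 _
  unfold Spec_lc_1771
  rw [pv_ansA word1 word2, pv_ansB word1 word2]
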